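-- pv_equiv track=rewrite | github.com/soojxng/algorithm-practice | 프로그래머스/1/72410. 신규 아이디 추천/신규 아이디 추천.py | solution
-- ===== SOURCE A (Python) =====
-- def solution(new_id):
--     answer = ''
--     able = 'abcdefghijklnmopqrstuvwxyz0123456789-_.'
--     new_id = new_id.lower()
--
--     for i in new_id:
--         if i not in able:
--             continue
--         if i == '.' and (len(answer) == 0 or answer[-1] == '.'):
--             continue
--         answer += i
--
--     if len(answer) > 0 and answer[-1] == '.':
--         answer = answer[:-1]
--     if answer == '':
--         answer = 'a'
--     if len(answer) >= 16:
--         answer = answer[:15] if answer[14] != '.' else answer[:14]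
--     if len(answer) <= 2:
--         while len(answer) != 3:
--             answer += answer[-1]
--
--     return answer
-- ===== SOURCE B (Python) =====
-- def solution(new_id):
--     st = new_id.lower()
--     st = ''.join(c for c in st if 'a' <= c <= 'z' or '0' <= c <= '9' or c in '-_.')
--     st = '.'.join(p for p in st.split('.') if p)
--     st = (st or 'a')[:15]
--     if st.endswith('.'):
--         st = st[:-1]
--     return st + st[-1] * max(0, 3 - len(st))
-- ===== Notes on version B (the rewrite author's own statement) =====
-- stated objective: idiomatic
-- what changed: A's single stateful character loop (accumulator with inline membership test, dot-collapse via last-char inspection, then four fix-up branches incl. a while-loop pad) is replaced by a multi-pass pipeline: filter by character-range predicate, collapse/strip dots by split('.')-drop-empties-join('.'), unconditional [:15] slice with endswith-dot strip, and arithmetic padding st[-1]*max(0,3-len).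
import Mathlib
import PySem

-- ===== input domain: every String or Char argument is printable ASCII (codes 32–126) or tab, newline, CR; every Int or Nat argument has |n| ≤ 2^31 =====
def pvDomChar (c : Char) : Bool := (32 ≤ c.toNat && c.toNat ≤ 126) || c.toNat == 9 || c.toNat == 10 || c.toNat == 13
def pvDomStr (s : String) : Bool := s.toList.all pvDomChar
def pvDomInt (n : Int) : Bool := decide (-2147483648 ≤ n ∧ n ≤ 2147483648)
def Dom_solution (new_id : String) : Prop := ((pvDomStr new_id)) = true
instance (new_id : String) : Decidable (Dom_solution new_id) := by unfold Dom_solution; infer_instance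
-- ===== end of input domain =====

-- B replaces A's stateful single character loop by an idiomatic multi-pass pipeline
-- (range-predicate filter, split/join dot collapse, slice, arithmetic pad); return values proved equal.

-- ===== PORT A =====

-- able = 'abcdefghijklnmopqrstuvwxyz0123456789-_.'
def pyAbleA : List Char := "abcdefghijklnmopqrstuvwxyz0123456789-_.".toList

-- loop body: 'if i not in able: continue; if i == "." and (len(answer)==0 or answer[-1]=="."): continue; answer += i'
def solStepA (answer : List Char) (i : Char) : List Char :=
  if ¬ (PySem.Chars.isIn [i] pyAbleA = true) then answer
  else if i = '.' ∧ (answer.length = 0 ∨ PySem.List.pyGetD answer (-1) 'a' = '.') then answer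
  else answer ++ [i]

-- 'while len(answer) != 3: answer += answer[-1]' — fuel-bounded while loop; entered only
-- with 1 ≤ len ≤ 2, so fuel 3 covers every iteration the Python loop performs
def padWhileA : Nat → List Char → List Char
  | 0, l => l
  | n+1, l => if l.length ≠ 3 then padWhileA n (l ++ [PySem.List.pyGetD l (-1) 'a']) else l

def solution (new_id : String) : String :=
  let lowered := PySem.Chars.lower new_id.toList
  let answer := lowered.foldl solStepA []
  let answer := if answer.length > 0 ∧ PySem.List.pyGetD answer (-1) 'a' = '.'
                then PySem.List.slice answer none (some (-1)) else answer
  let answer := if answer = [] then ['a'] else answer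
  let answer := if answer.length ≥ 16 then
      (if PySem.List.pyGetD answer 14 'a' ≠ '.' then PySem.List.slice answer none (some 15)
       else PySem.List.slice answer none (some 14)) else answer
  let answer := if answer.length ≤ 2 then padWhileA 3 answer else answer
  String.ofList answer

-- ===== PORT B =====

-- "'a' <= c <= 'z' or '0' <= c <= '9' or c in '-_.'"
def predB (c : Char) : Bool :=
  ('a' ≤ c && c ≤ 'z') || ('0' ≤ c && c ≤ '9') || PySem.Chars.isIn [c] "-_.".toList

def solution_alt (new_id : String) : String :=
  let st := PySem.Chars.lower new_id.toList
  let st := st.filter predB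
  let st := PySem.Chars.join ['.'] ((PySem.Chars.splitOn st ['.']).filter (· ≠ []))
  let st := PySem.List.slice (if st = [] then ['a'] else st) none (some 15)
  let st := if PySem.Chars.endswith st ['.'] then PySem.List.slice st none (some (-1)) else st
  String.ofList (st ++ List.replicate (max 0 (3 - (st.length : Int))).toNat
                        (PySem.List.pyGetD st (-1) 'a'))

-- ===== PRECONDITION & SPEC =====
def Spec_solution (new_id : String) (out : String) : Prop := out = solution_alt new_id
instance (new_id : String) (out : String) : Decidable (Spec_solution new_id out) := by unfold Spec_solution; infer_instance

-- ===== CLAIM (what is proved, stated in full; the proofs are below) =====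
def Claim_equal_solution : Prop := ∀ (new_id : String), Dom_solution new_id → Spec_solution new_id (solution new_id)

-- ===== LEMMAS AND PROOFS =====

-- A's loop body once the membership test has been factored out
def dotStepA (a : List Char) (i : Char) : List Char :=
  if i = '.' ∧ (a.length = 0 ∨ PySem.List.pyGetD a (-1) 'a' = '.') then a else a ++ [i]

-- A's collapse loop as a two-state machine: s = true ↔ "answer is empty or ends with '.'"
def goA (s : Bool) : List Char → List Char
  | [] => []
  | c :: r =>
    if c = '.' then (if s then goA s r else '.' :: goA true r)
    else c :: goA false r

-- the common normal form of the collapsed string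
def nrm (s : Bool) : List Char → List Char
  | [] => []
  | c :: r =>
    if c = '.' then
      (if s then nrm true r else (if nrm true r = [] then [] else '.' :: nrm true r))
    else c :: nrm false r

def stripOne (l : List Char) : List Char :=
  if l.getLast? = some '.' then l.dropLast else l

-- accumulator spec for PySem.Chars.splitOn.go with sep = ['.']
def mySplit : List Char → List Char → List (List Char)
  | [], cur => [cur.reverse]
  | c :: r, cur => if c = '.' then cur.reverse :: mySplit r [] else mySplit r (c :: cur)

def jNE : List (List Char) → List Char
  | [] => []
  | p :: ps => if p = [] then jNE ps else p ++ tJNE ps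
where tJNE : List (List Char) → List Char
  | [] => []
  | p :: ps => if p = [] then tJNE ps else ('.' :: p) ++ tJNE ps

def hdTl : List (List Char) → List Char
  | [] => []
  | p :: ps => p ++ jNE.tJNE ps

theorem able_mem (c : Char) : PySem.Chars.isIn [c] pyAbleA = predB c := by
  have e1 : pyAbleA = ['a','b','c','d','e','f','g','h','i','j','k','l','n','m','o','p','q','r','s','t','u','v','w','x','y','z','0','1','2','3','4','5','6','7','8','9','-','_','.'] := by decide
  have e2 : "-_.".toList = ['-','_','.'] := by decide
  have h1 : ∀ (l : List Char), PySem.Chars.isIn [c] l = true ↔ c ∈ l := by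
    intro l
    rw [PySem.Chars.isIn_iff_infix]
    exact List.singleton_infix_iff c l
  have h2 : PySem.Chars.isIn [c] pyAbleA = true ↔ predB c = true := by
    rw [h1, predB, e1]
    simp only [Bool.or_eq_true, Bool.and_eq_true, decide_eq_true_eq, h1, e2]
    simp only [List.mem_cons, List.not_mem_nil, or_false]
    simp only [Char.ext_iff, Char.le_def, UInt32.le_iff_toNat_le, UInt32.ext_iff]
    simp only [Char.reduceVal, UInt32.reduceToNat]
    omega
  rcases hb : predB c with _|_
  · rw [Bool.eq_false_iff]; intro h; have := h2.mp h; rw [hb] at this; cases this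
  · exact h2.mpr hb

theorem getLast?_cons_ne {α : Type} (a : α) (y : List α) (h : y ≠ []) :
    (a :: y).getLast? = y.getLast? := by
  rcases y.eq_nil_or_concat with rfl|⟨ys,z,rfl⟩
  · exact absurd rfl h
  · rw [List.concat_eq_append, show a :: (ys ++ [z]) = (a :: ys) ++ [z] from rfl]
    exact (List.getLast?_concat).trans (List.getLast?_concat).symm

theorem solStepA_eq (a : List Char) (i : Char) :
    solStepA a i = if PySem.Chars.isIn [i] pyAbleA then dotStepA a i else a := by
  rcases h : PySem.Chars.isIn [i] pyAbleA with _|_ <;>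
    simp [solStepA, dotStepA, h]

theorem foldA_filter (l : List Char) (acc : List Char) :
    l.foldl solStepA acc
      = (l.filter (fun i => PySem.Chars.isIn [i] pyAbleA)).foldl dotStepA acc := by
  induction l generalizing acc with
  | nil => rfl
  | cons c r ih =>
    rcases h : PySem.Chars.isIn [c] pyAbleA with _|_ <;>
      simp [List.foldl_cons, h, solStepA_eq, ih]

-- the loop condition in terms of getLast?
theorem dotCond_iff (a : List Char) :
    (a.length = 0 ∨ PySem.List.pyGetD a (-1) 'a' = '.') ↔ (a = [] ∨ a.getLast? = some '.') := by
  rcases a.eq_nil_or_concat with h | ⟨ys, y, rfl⟩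
  · subst h; simp
  · rw [List.concat_eq_append]
    constructor
    · rintro (h | h)
      · simp at h
      · right
        rw [PySem.List.pyGetD_neg_one_append_singleton] at h
        rw [h, List.getLast?_concat]
    · rintro (h | h)
      · simp at h
      · right
        rw [PySem.List.pyGetD_neg_one_append_singleton]
        rw [List.getLast?_concat] at h
        exact (Option.some.injEq _ _ ▸ h)

theorem loop_eq_goA (l : List Char) (acc : List Char) (s : Bool)
    (h : (acc = [] ∨ acc.getLast? = some '.') ↔ s = true) :
    l.foldl dotStepA acc = acc ++ goA s l := by
  induction l generalizing acc s with
  | nil => simp [goA]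
  | cons c r ih =>
    by_cases hc : c = '.'
    · subst hc
      rcases s with _|_
      · have hcond : ¬ ('.' = '.' ∧ (acc.length = 0 ∨ PySem.List.pyGetD acc (-1) 'a' = '.')) := by
          rw [dotCond_iff]; simp at h; simp [h]
        rw [List.foldl_cons]
        rw [show dotStepA acc '.' = acc ++ ['.'] from by
          unfold dotStepA; rw [if_neg hcond]]
        rw [ih (acc ++ ['.']) true (by simp)]
        simp [goA]
      · have hcond : ('.' = '.' ∧ (acc.length = 0 ∨ PySem.List.pyGetD acc (-1) 'a' = '.')) := by
          rw [dotCond_iff]; simp at h; simp [h]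
        rw [List.foldl_cons]
        rw [show dotStepA acc '.' = acc from by
          unfold dotStepA; rw [if_pos hcond]]
        rw [ih acc true h]
        simp [goA]
    · rw [List.foldl_cons]
      rw [show dotStepA acc c = acc ++ [c] from by simp [dotStepA, hc]]
      rw [ih (acc ++ [c]) false (by simp [hc])]
      simp [goA, hc]

theorem goA_head (l : List Char) : goA true l = [] ∨ (goA true l).head? ≠ some '.' := by
  induction l with
  | nil => left; rfl
  | cons c r ih =>
    by_cases hc : c = '.'
    · subst hc; simpa [goA] using ih
    · right; simp [goA, hc]

theorem stripOne_cons (a : Char) (y : List Char) (h : y ≠ []) :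
    stripOne (a :: y) = a :: stripOne y := by
  unfold stripOne
  rw [getLast?_cons_ne _ _ h, List.dropLast_cons_of_ne_nil h]
  split_ifs <;> rfl

theorem stripOne_ne_nil (x : Char) (xs : List Char) (hx : x ≠ '.') :
    stripOne (x :: xs) ≠ [] := by
  rcases xs.eq_nil_or_concat with h | ⟨ys, y, rfl⟩
  · subst h; simp [stripOne, hx]
  · rw [stripOne_cons x _ (by simp)]
    simp

theorem stripOne_goA (l : List Char) (s : Bool) : stripOne (goA s l) = nrm s l := by
  induction l generalizing s with
  | nil => simp [goA, nrm, stripOne]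
  | cons c r ih =>
    by_cases hc : c = '.'
    · subst hc
      rcases s with _|_
      · rw [show goA false ('.'::r) = '.' :: goA true r from by simp [goA]]
        rw [show nrm false ('.'::r)
              = if nrm true r = [] then [] else '.' :: nrm true r from by simp [nrm]]
        rcases hg : goA true r with _|⟨x, xs⟩
        · have h0 : nrm true r = [] := by rw [← ih true, hg]; rfl
          rw [h0]; simp [stripOne]
        · have hx : x ≠ '.' := by
            rcases goA_head r with h | h
            · rw [hg] at h; cases h
            · rw [hg] at h; simpa using h
          have hne : nrm true r ≠ [] := by
            rw [← ih true, hg]; exact stripOne_ne_nil x xs hx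
          rw [if_neg hne]
          rw [stripOne_cons '.' (x :: xs) (by simp)]
          rw [← hg, ih true]
      · rw [show goA true ('.'::r) = goA true r from by simp [goA]]
        rw [show nrm true ('.'::r) = nrm true r from by simp [nrm]]
        exact ih true
    · rw [show goA s (c::r) = c :: goA false r from by simp [goA, hc]]
      rw [show nrm s (c::r) = c :: nrm false r from by simp [nrm, hc]]
      rcases hg : goA false r with _|⟨x, xs⟩
      · have h0 : nrm false r = [] := by rw [← ih false, hg]; rfl
        rw [h0]; simp [stripOne, hc]
      · rw [stripOne_cons c (x :: xs) (by simp)]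
        rw [← hg, ih false]

theorem go_spec (fuel : Nat) (l cur : List Char) (acc : List (List Char))
    (h : l.length ≤ fuel) :
    PySem.Chars.splitOn.go ['.'] fuel l cur acc = acc.reverse ++ mySplit l cur := by
  induction fuel generalizing l cur acc with
  | zero =>
    have : l = [] := by simpa using List.length_eq_zero_iff.mp (Nat.le_zero.mp h)
    subst this
    simp [PySem.Chars.splitOn.go, mySplit]
  | succ n ih =>
    rcases l with _|⟨c, rest⟩
    · simp [PySem.Chars.splitOn.go, mySplit]
    · by_cases hc : c = '.'
      · subst hc
        rw [show PySem.Chars.splitOn.go ['.'] (n+1) ('.'::rest) cur acc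
              = PySem.Chars.splitOn.go ['.'] n rest [] (cur.reverse :: acc) from by
            simp [PySem.Chars.splitOn.go, List.isPrefixOf]]
        rw [ih rest [] _ (by simpa using Nat.le_of_succ_le_succ h)]
        simp [mySplit]
      · have hp : ['.'].isPrefixOf (c :: rest) = false := by
          simp [List.isPrefixOf]; exact fun he => hc he.symm
        rw [show PySem.Chars.splitOn.go ['.'] (n+1) (c::rest) cur acc
              = PySem.Chars.splitOn.go ['.'] n rest (c :: cur) acc from by
            simp [PySem.Chars.splitOn.go, hp]]
        rw [ih rest (c :: cur) _ (by simpa using Nat.le_of_succ_le_succ h)]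
        simp [mySplit, hc]

theorem splitOn_eq_mySplit (l : List Char) :
    PySem.Chars.splitOn l ['.'] = mySplit l [] := by
  rw [PySem.Chars.splitOn, go_spec (l.length + 1) l [] [] (by omega)]
  rfl

theorem mySplit_mod (l : List Char) (cur : List Char) :
    mySplit l cur = (mySplit l []).modifyHead (cur.reverse ++ ·) := by
  induction l generalizing cur with
  | nil => simp [mySplit]
  | cons c r ih =>
    by_cases hc : c = '.'
    · subst hc; simp [mySplit]
    · rw [show mySplit (c :: r) cur = mySplit r (c :: cur) from by simp [mySplit, hc]]
      rw [show mySplit (c :: r) [] = mySplit r [c] from by simp [mySplit, hc]]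
      rw [ih (c :: cur), ih [c]]
      rw [List.modifyHead_modifyHead]
      congr 1
      funext x
      simp

theorem mySplit_ne_nil (l : List Char) (cur : List Char) : mySplit l cur ≠ [] := by
  induction l generalizing cur with
  | nil => simp [mySplit]
  | cons c r ih => by_cases hc : c = '.' <;> simp [mySplit, hc, ih]

theorem tJNE_eq (ps : List (List Char)) :
    jNE.tJNE ps = if jNE ps = [] then [] else '.' :: jNE ps := by
  induction ps with
  | nil => simp [jNE.tJNE, jNE]
  | cons p ps ih =>
    by_cases hp : p = []
    · simp [jNE.tJNE, jNE, hp, ih]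
    · simp [jNE.tJNE, jNE, hp]

theorem intercalate_dot_cons_cons (a b : List Char) (l : List (List Char)) :
    ['.'].intercalate (a :: b :: l) = a ++ '.' :: ['.'].intercalate (b :: l) := by
  simp [List.intercalate, List.intersperse]

theorem join_filter_eq_jNE (ps : List (List Char)) :
    PySem.Chars.join ['.'] (ps.filter (· ≠ [])) = jNE ps := by
  rw [PySem.Chars.join]
  induction ps with
  | nil => simp [jNE, List.intercalate]
  | cons p ps ih =>
    by_cases hp : p = []
    · simpa [List.filter_cons, hp, jNE] using ih
    · rw [List.filter_cons, if_pos (by simpa using hp)]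
      rcases hq : ps.filter (· ≠ []) with _|⟨q, rs⟩
      · have : jNE ps = [] := by rw [← ih, hq]; simp [List.intercalate]
        simp [List.intercalate, jNE, hp, tJNE_eq, this]
      · have hne : jNE ps ≠ [] := by
          rw [← ih, hq]
          have hq' : q ≠ [] := by
            have := List.of_mem_filter (a := q) (l := ps) (p := (· ≠ []))
              (by rw [hq]; exact List.mem_cons_self)
            simpa using this
          rcases q with _|⟨a, as⟩
          · exact absurd rfl hq'
          · rcases rs with _|⟨b, bs⟩
            · simp [List.intercalate]
            · rw [intercalate_dot_cons_cons]; simp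
        rw [intercalate_dot_cons_cons]
        rw [← hq, ih]
        simp [jNE, hp, tJNE_eq, hne]

theorem split_join_eq_nrm (l : List Char) :
    (jNE (mySplit l []) = nrm true l) ∧ (hdTl (mySplit l []) = nrm false l) := by
  induction l with
  | nil => exact ⟨by simp [mySplit, jNE, nrm], by simp [mySplit, hdTl, jNE.tJNE, nrm]⟩
  | cons c r ih =>
    obtain ⟨ih1, ih2⟩ := ih
    by_cases hc : c = '.'
    · subst hc
      have hsp : mySplit ('.'::r) [] = [] :: mySplit r [] := by simp [mySplit]
      constructor
      · rw [hsp, show jNE ([] :: mySplit r []) = jNE (mySplit r []) from by simp [jNE]]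
        rw [ih1, show nrm true ('.'::r) = nrm true r from by simp [nrm]]
      · rw [hsp, show hdTl ([] :: mySplit r []) = jNE.tJNE (mySplit r []) from by simp [hdTl]]
        rw [tJNE_eq, ih1,
            show nrm false ('.'::r)
              = if nrm true r = [] then [] else '.' :: nrm true r from by simp [nrm]]
    · rcases hq : mySplit r [] with _|⟨p, ps⟩
      · exact absurd hq (mySplit_ne_nil r [])
      · have hsplit : mySplit (c :: r) [] = (c :: p) :: ps := by
          rw [show mySplit (c :: r) [] = mySplit r [c] from by simp [mySplit, hc]]
          rw [mySplit_mod r [c], hq]; simp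
        have hrhs : p ++ jNE.tJNE ps = nrm false r := by
          rw [← ih2, hq]; simp [hdTl]
        constructor
        · rw [hsplit, show jNE ((c :: p) :: ps) = (c :: p) ++ jNE.tJNE ps from by simp [jNE],
              show nrm true (c :: r) = c :: nrm false r from by simp [nrm, hc]]
          simp [hrhs]
        · rw [hsplit, show hdTl ((c :: p) :: ps) = (c :: p) ++ jNE.tJNE ps from rfl,
              show nrm false (c :: r) = c :: nrm false r from by simp [nrm, hc]]
          simp [hrhs]

theorem nrm_getLast (s : Bool) (l : List Char) : (nrm s l).getLast? ≠ some '.' := by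
  induction l generalizing s with
  | nil => simp [nrm]
  | cons c r ih =>
    by_cases hc : c = '.'
    · subst hc
      rcases s with _|_
      · rw [show nrm false ('.'::r)
              = if nrm true r = [] then [] else '.' :: nrm true r from by simp [nrm]]
        rcases hn : nrm true r with _|⟨x, xs⟩
        · simp
        · rw [if_neg (by simp : (x :: xs) ≠ [])]
          rw [getLast?_cons_ne _ _ (by simp : (x :: xs) ≠ [])]
          rw [← hn]; exact ih true
      · rw [show nrm true ('.'::r) = nrm true r from by simp [nrm]]
        exact ih true
    · rw [show nrm s (c::r) = c :: nrm false r from by simp [nrm, hc]]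
      rcases hn : nrm false r with _|⟨x, xs⟩
      · simp [hc]
      · rw [getLast?_cons_ne _ _ (by simp : (x :: xs) ≠ [])]
        rw [← hn]; exact ih false

-- A's one-dot strip equals stripOne
theorem aStrip_eq (x : List Char) :
    (if x.length > 0 ∧ PySem.List.pyGetD x (-1) 'a' = '.'
     then PySem.List.slice x none (some (-1)) else x) = stripOne x := by
  rcases x.eq_nil_or_concat with h | ⟨ys, y, rfl⟩
  · subst h; simp [stripOne]
  · rw [List.concat_eq_append, PySem.List.slice_to_neg_one]
    by_cases hy : y = '.'
    · subst hy
      rw [if_pos ⟨by simp, by rw [PySem.List.pyGetD_neg_one_append_singleton]⟩]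
      simp [stripOne]
    · rw [if_neg (by rw [PySem.List.pyGetD_neg_one_append_singleton]; simp [hy])]
      simp [stripOne, hy]

-- singleton suffix ↔ last char
theorem endswith_dot_iff (x : List Char) :
    PySem.Chars.endswith x ['.'] = true ↔ x.getLast? = some '.' := by
  rw [PySem.Chars.endswith, List.isSuffixOf_iff_suffix]
  constructor
  · rintro ⟨t, rfl⟩; simp
  · intro h
    obtain ⟨ys, rfl⟩ := List.getLast?_eq_some_iff.mp h
    exact ⟨ys, rfl⟩

-- truncation step: A's len>=16 branch equals B's unconditional take-15 + trailing-dot strip,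
-- for a nonempty string not ending in '.'
theorem trunc_eq (x : List Char) (_hx : x ≠ []) (hl : x.getLast? ≠ some '.') :
    (if x.length ≥ 16 then
      (if PySem.List.pyGetD x 14 'a' ≠ '.' then PySem.List.slice x none (some 15)
       else PySem.List.slice x none (some 14)) else x)
    = (if PySem.Chars.endswith (PySem.List.slice x none (some 15)) ['.']
       then PySem.List.slice (PySem.List.slice x none (some 15)) none (some (-1))
       else PySem.List.slice x none (some 15)) := by
  have h15 : PySem.List.slice x none (some 15) = x.take 15 := by
    rw [show (15:Int) = ((15:Nat):Int) from by norm_num, PySem.List.slice_to_natCast]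
  have h14 : PySem.List.slice x none (some 14) = x.take 14 := by
    rw [show (14:Int) = ((14:Nat):Int) from by norm_num, PySem.List.slice_to_natCast]
  by_cases hlen : x.length ≥ 16
  · have h14lt : 14 < x.length := by omega
    have htake : x.take 15 = x.take 14 ++ [x[14]] := by
      rw [List.take_add_one]
      simp [List.getElem?_eq_getElem h14lt]
    have hget : PySem.List.pyGetD x 14 'a' = x[14] := by
      rw [show (14 : Int) = ((14 : Nat) : Int) from by norm_num, PySem.List.pyGetD_natCast]
      simp [List.getD, List.getElem?_eq_getElem h14lt]
    have hlast : (x.take 15).getLast? = some x[14] := by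
      rw [htake]; exact List.getLast?_concat
    by_cases hdot : x[14] = '.'
    · rw [if_pos hlen, if_neg (by simp [hget, hdot])]
      rw [if_pos (by rw [endswith_dot_iff, h15, hlast, hdot])]
      rw [PySem.List.slice_to_neg_one, h15, h14, htake, List.dropLast_concat]
    · rw [if_pos hlen, if_pos (by simp [hget, hdot])]
      rw [if_neg (by rw [endswith_dot_iff, h15, hlast]; simp [hdot])]
  · have hle : x.length ≤ 15 := by omega
    have : x.take 15 = x := List.take_of_length_le hle
    rw [if_neg hlen, h15, this]
    rw [if_neg (by rw [endswith_dot_iff]; exact hl)]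

-- padding step: A's while loop equals B's replicate formula, for nonempty input
theorem pad_eq (x : List Char) (hx : x ≠ []) :
    (if x.length ≤ 2 then padWhileA 3 x else x)
    = x ++ List.replicate (max 0 (3 - (x.length : Int))).toNat
             (PySem.List.pyGetD x (-1) 'a') := by
  rcases x with _|⟨a, x⟩
  · exact absurd rfl hx
  · rcases x with _|⟨b, x⟩
    · simp [padWhileA, PySem.List.pyGetD, PySem.List.pyGet?, PySem.List.pyIdx?]
    · rcases x with _|⟨c, x⟩
      · simp [padWhileA, PySem.List.pyGetD, PySem.List.pyGet?, PySem.List.pyIdx?]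
      · have hlen : (a :: b :: c :: x).length = x.length + 3 := by simp
        rw [if_neg (by simp [hlen])]
        rw [show (max 0 (3 - ((a :: b :: c :: x).length : Int))).toNat = 0 from by
          rw [hlen]; push_cast; omega]
        simp

-- ===== VERDICT (by name: the statement is the Claim_ definition above) =====
theorem solution_spec : Claim_equal_solution := by
  unfold Claim_equal_solution Spec_solution
  intro new_id _
  unfold solution solution_alt
  simp only []
  set lowered := PySem.Chars.lower new_id.toList with hlow
  -- the filtered character stream is the same on both sides
  have hfilter : lowered.filter (fun i => PySem.Chars.isIn [i] pyAbleA) = lowered.filter predB := by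
    apply List.filter_congr
    intro c _
    rw [able_mem]
  -- A's loop + strip = nrm true f = B's split/join collapse
  have hA : lowered.foldl solStepA [] = goA true (lowered.filter predB) := by
    rw [foldA_filter, hfilter, loop_eq_goA _ [] true (by simp)]
    rfl
  have hB : PySem.Chars.join ['.']
      ((PySem.Chars.splitOn (lowered.filter predB) ['.']).filter (· ≠ []))
      = nrm true (lowered.filter predB) := by
    rw [splitOn_eq_mySplit, join_filter_eq_jNE]
    exact (split_join_eq_nrm (lowered.filter predB)).1
  rw [hA, hB, aStrip_eq, stripOne_goA]
  set m := nrm true (lowered.filter predB) with hm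
  have hml : m.getLast? ≠ some '.' := nrm_getLast true _
  set a2 := if m = [] then ['a'] else m with ha2
  have ha2ne : a2 ≠ [] := by
    rw [ha2]; split_ifs with h
    · simp
    · exact h
  have ha2l : a2.getLast? ≠ some '.' := by
    rw [ha2]; split_ifs with h
    · simp
    · exact hml
  rw [trunc_eq a2 ha2ne ha2l]
  set b3 := if PySem.Chars.endswith (PySem.List.slice a2 none (some 15)) ['.']
       then PySem.List.slice (PySem.List.slice a2 none (some 15)) none (some (-1))
       else PySem.List.slice a2 none (some 15) with hb3
  have h15 : PySem.List.slice a2 none (some 15) = a2.take 15 := by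
    rw [show (15:Int) = ((15:Nat):Int) from by norm_num, PySem.List.slice_to_natCast]
  have hb3ne : b3 ≠ [] := by
    rw [hb3]
    split_ifs with h
    · rw [PySem.List.slice_to_neg_one, h15]
      rw [endswith_dot_iff, h15] at h
      intro hcon
      have hlen2 : (a2.take 15).length ≤ 1 := by
        have hL := @List.length_dropLast Char (a2.take 15)
        rw [hcon] at hL
        simp only [List.length_nil] at hL
        omega
      rcases a2 with _|⟨u, us⟩
      · exact ha2ne rfl
      · rcases us with _|⟨v, vs⟩
        · rw [List.take_of_length_le (by simp)] at h
          simp at h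
          exact ha2l (by simp [h])
        · rw [List.length_take] at hlen2
          simp at hlen2
      
    · rw [h15]
      simp [List.take_eq_nil_iff, ha2ne]
  rw [pad_eq b3 hb3ne]
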